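-- pv_equiv track=rewrite | github.com/cherylbunny/neoval-project | python_code/plot_arimax_factor_approx.py | region2label
-- ===== SOURCE A (Python) =====
-- def region2label(region, remove_greater=True, max_components=3, max_len=50):
--     region = region.replace('AUSTRALIAN CAPITAL TERRITORY', 'ACT').replace('SYDNEY - ','')
--     region = region.strip()
--     if remove_greater:
--         region = region.replace('GREATER ', '')
--     if ',' in region:
--         return ",".join([
--             region2label(e, remove_greater=remove_greater,
--                          max_components=max_components, max_len=max_len)
--             for e in region.split(',')
--         ])
--     def word2lower(string):
--         if string in ['NSW','QLD','WA','SA','ACT','TAS','VIC','NT']: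
--             return string
--         return string[0].upper() + string[1:].lower()
--     def to_lower(string):
--         comps = [word2lower(e) for e in string.split(" ")]
--         return " ".join(comps)
--     def abbrev(string):
--         if len(string) > max_len:
--             return ''.join(e[0] for e in string.split(' '))
--         return string
--     components = [abbrev(to_lower(e.strip())) for e in region.split('-')][:max_components]
--     return " - ".join(components).strip()
-- ===== SOURCE B (Python) =====
-- def region2label(region, remove_greater=True, max_components=3, max_len=50):
--     states = {'NSW', 'QLD', 'WA', 'SA', 'ACT', 'TAS', 'VIC', 'NT'}
--
--     def prep(s):
--         s = s.replace('AUSTRALIAN CAPITAL TERRITORY', 'ACT').replace('SYDNEY - ', '').strip()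
--         return s.replace('GREATER ', '') if remove_greater else s
--
--     def fold(w):
--         return w if w in states else w[0].upper() + w[1:].lower()
--
--     def label(s):
--         out = []
--         for piece in s.split('-')[:max_components]:
--             t = piece.strip()
--             words = [fold(w) for w in t.split(' ')]
--             out.append(''.join(w[0] for w in words) if len(t) > max_len
--                        else ' '.join(words))
--         return ' - '.join(out).strip()
--
--     r = prep(region)
--     parts = r.split(',')
--     if len(parts) == 1:
--         return label(r)
--     return ','.join(label(prep(p)) for p in parts)
-- ===== Notes on version B (the rewrite author's own statement) =====
-- stated objective: simpler
-- what changed: Replaced the recursion over comma pieces by one flat loop, truncated to max_components before (not after) the per-piece work, and replaced the lowercase-whole-then-resplit abbrev step by a single space-split per dash piece with the length test on the stripped piece itself.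
-- outside the precondition, e.g. on region2label('-', True, 3, 50): A raises IndexError, B raises IndexError
import Mathlib
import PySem

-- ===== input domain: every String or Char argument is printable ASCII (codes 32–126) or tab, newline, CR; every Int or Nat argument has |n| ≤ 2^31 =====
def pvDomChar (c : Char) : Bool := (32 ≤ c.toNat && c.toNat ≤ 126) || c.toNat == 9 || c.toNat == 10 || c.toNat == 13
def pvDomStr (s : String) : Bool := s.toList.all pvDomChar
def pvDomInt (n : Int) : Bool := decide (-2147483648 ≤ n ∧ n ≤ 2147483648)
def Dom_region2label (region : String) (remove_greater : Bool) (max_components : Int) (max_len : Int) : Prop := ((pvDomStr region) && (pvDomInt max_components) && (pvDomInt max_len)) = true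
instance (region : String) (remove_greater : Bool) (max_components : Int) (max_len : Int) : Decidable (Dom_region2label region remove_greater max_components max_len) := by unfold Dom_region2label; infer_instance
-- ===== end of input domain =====

-- B re-implements region2label non-recursively: one flat pass over the comma pieces, truncation to
-- max_components before (not after) the per-piece work, and per dash piece a single space-split with the
-- length test on the stripped piece itself (A lowercases the piece and re-splits it inside abbrev).

-- ===== PORT A =====
-- shared by both ports: the preprocessing lines and the word-case helper appear verbatim in both Pythons
def pvStates : List (List Char) :=
  ["NSW", "QLD", "WA", "SA", "ACT", "TAS", "VIC", "NT"].map String.toList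

def pvPrep (s : List Char) (remove_greater : Bool) : List Char :=
  let s1 := PySem.Chars.replace s "AUSTRALIAN CAPITAL TERRITORY".toList "ACT".toList
  let s2 := PySem.Chars.replace s1 "SYDNEY - ".toList []
  let s3 := PySem.Chars.strip s2
  if remove_greater then PySem.Chars.replace s3 "GREATER ".toList [] else s3

-- word2lower / fold: `string[0]` raises IndexError on an empty word (excluded by Pre_); the `none` arm is that case
def pvWordFold (w : List Char) : List Char :=
  if w ∈ pvStates then w
  else
    match PySem.List.pyGet? w 0 with
    | some c => PySem.Chars.upperChar c :: PySem.Chars.lower (PySem.List.slice w (some 1) none)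
    | none => []

def pvToLowerA (s : List Char) : List Char :=
  PySem.Chars.join [' '] ((PySem.Chars.splitOn s [' ']).map pvWordFold)

def pvAbbrevA (max_len : Int) (s : List Char) : List Char :=
  if (s.length : Int) > max_len then
    PySem.Chars.join [] ((PySem.Chars.splitOn s [' ']).map (fun e =>
      match PySem.List.pyGet? e 0 with
      | some c => [c]
      | none => []))
  else s

def pvBaseA (s : List Char) (max_components max_len : Int) : List Char :=
  PySem.Chars.strip (PySem.Chars.join " - ".toList
    (PySem.List.slice ((PySem.Chars.splitOn s ['-']).map (fun e =>
      pvAbbrevA max_len (pvToLowerA (PySem.Chars.strip e)))) none (some max_components)))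

-- A's recursion: split(',') pieces contain no comma and pvPrep introduces none, so the recursive call
-- always takes the comma-free path; that single unfolding is written out (Python's recursion depth is ≤ 1).
def region2label (region : String) (remove_greater : Bool) (max_components : Int) (max_len : Int) : String :=
  let r := pvPrep region.toList remove_greater
  if PySem.Chars.isIn [','] r then
    String.ofList (PySem.Chars.join [','] ((PySem.Chars.splitOn r [',']).map (fun e =>
      pvBaseA (pvPrep e remove_greater) max_components max_len)))
  else String.ofList (pvBaseA r max_components max_len)

-- ===== PORT B =====
def pvPieceB (max_len : Int) (piece : List Char) : List Char :=
  let t := PySem.Chars.strip piece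
  let words := (PySem.Chars.splitOn t [' ']).map pvWordFold
  if (t.length : Int) > max_len then
    PySem.Chars.join [] (words.map (fun w =>
      match PySem.List.pyGet? w 0 with
      | some c => [c]
      | none => []))
  else PySem.Chars.join [' '] words

def pvLabelB (s : List Char) (max_components max_len : Int) : List Char :=
  PySem.Chars.strip (PySem.Chars.join " - ".toList
    ((PySem.List.slice (PySem.Chars.splitOn s ['-']) none (some max_components)).map (pvPieceB max_len)))

def region2label_alt (region : String) (remove_greater : Bool) (max_components : Int) (max_len : Int) : String :=
  let r := pvPrep region.toList remove_greater
  let parts := PySem.Chars.splitOn r [',']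
  if parts.length == 1 then String.ofList (pvLabelB r max_components max_len)
  else String.ofList (PySem.Chars.join [','] (parts.map (fun p =>
    pvLabelB (pvPrep p remove_greater) max_components max_len)))

-- ===== PRECONDITION & SPEC =====
-- a comma-free piece makes A raise IndexError iff some dash component, stripped, has an empty
-- space-separated word (string[0] on '')
def pvBad (r : List Char) : Bool :=
  (PySem.Chars.splitOn r ['-']).any (fun d =>
    (PySem.Chars.splitOn (PySem.Chars.strip d) [' ']).any List.isEmpty)

-- Pre_ excludes exactly the inputs where A raises IndexError: an empty space-separated word (from
-- leading/trailing/adjacent '-', or a double space) in some processed comma piece.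
def Pre_region2label (region : String) (remove_greater : Bool) (max_components : Int) (max_len : Int) : Prop :=
  (let r := pvPrep region.toList remove_greater
   if PySem.Chars.isIn [','] r then
     (PySem.Chars.splitOn r [',']).all (fun e => !pvBad (pvPrep e remove_greater))
   else !pvBad r) = true
instance (region : String) (remove_greater : Bool) (max_components : Int) (max_len : Int) : Decidable (Pre_region2label region remove_greater max_components max_len) := by unfold Pre_region2label; infer_instance

def pvWitness_region2label : String × Bool × Int × Int := ("GREATER SYDNEY - INNER WEST, NSW-CENTRAL COAST", true, 3, 50)

def Spec_region2label (region : String) (remove_greater : Bool) (max_components : Int) (max_len : Int) (out : String) : Prop := out = region2label_alt region remove_greater max_components max_len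
instance (region : String) (remove_greater : Bool) (max_components : Int) (max_len : Int) (out : String) : Decidable (Spec_region2label region remove_greater max_components max_len out) := by unfold Spec_region2label; infer_instance

-- ===== CLAIM (what is proved, stated in full; the proofs are below) =====
def Claim_equal_region2label : Prop := ∀ (region : String) (remove_greater : Bool) (max_components : Int) (max_len : Int), Dom_region2label region remove_greater max_components max_len → Pre_region2label region remove_greater max_components max_len → Spec_region2label region remove_greater max_components max_len (region2label region remove_greater max_components max_len)

-- ===== LEMMAS AND PROOFS =====

-- bridge: PySem's substring split, for a single-character separator, is Mathlib's List.splitOn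
theorem pv_go_splitOn (c : Char) (fuel : Nat) :
    ∀ (l cur : List Char) (accs : List (List Char)), l.length < fuel →
      PySem.Chars.splitOn.go [c] fuel l cur accs =
        accs.reverse ++ (l.splitOn c).modifyHead (cur.reverse ++ ·) := by
  induction fuel with
  | zero => intro l cur accs h; omega
  | succ fuel ih =>
    intro l cur accs h
    match l with
    | [] =>
      simp [PySem.Chars.splitOn.go, List.splitOn_nil]
    | c' :: rest =>
      rw [PySem.Chars.splitOn.go]
      simp only [List.isPrefixOf, Bool.and_true, List.length_cons,
        List.length_nil, Nat.zero_add, List.drop_one, List.tail_cons] at *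
      by_cases hc : c = c'
      · subst hc
        simp only [BEq.rfl, if_pos]
        rw [ih _ _ _ (by omega)]
        obtain ⟨hd, tl, e⟩ := List.exists_cons_of_ne_nil (List.splitOnP_ne_nil (· == c) rest)
        simp [List.splitOn, List.splitOnP_cons, e]
      · rw [if_neg (by simp [hc])]
        rw [ih _ _ _ (by omega)]
        have hc2 : ¬ c' = c := fun e => hc e.symm
        obtain ⟨hd, tl, e⟩ := List.exists_cons_of_ne_nil (List.splitOnP_ne_nil (· == c) rest)
        simp [List.splitOn, List.splitOnP_cons, hc2, e]

theorem pv_splitOn_eq (c : Char) (l : List Char) :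
    PySem.Chars.splitOn l [c] = l.splitOn c := by
  have h := pv_go_splitOn c (l.length + 1) l [] [] (by omega)
  have hid : ∀ (L : List (List Char)), L.modifyHead (fun x => x) = L := fun L => by
    cases L <;> rfl
  simpa [PySem.Chars.splitOn, hid] using h

theorem pv_splitOn_of_not_mem {c : Char} {l : List Char} (h : c ∉ l) : l.splitOn c = [l] := by
  induction l with
  | nil => simp [List.splitOn_nil]
  | cons a t ih =>
    have ha : ¬ (a = c) := fun e => h (by simp [e])
    have ht := ih (fun m => h (List.mem_cons_of_mem _ m))
    simp [List.splitOn, List.splitOnP_cons, ha] at *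
    simp [ht]

theorem pv_not_mem_of_mem_splitOn {c : Char} {l x : List Char} (h : x ∈ l.splitOn c) : c ∉ x := by
  induction l generalizing x with
  | nil =>
    simp [List.splitOn_nil] at h; simp [h]
  | cons a t ih =>
    simp only [List.splitOn] at h ih ⊢
    rw [List.splitOnP_cons] at h
    by_cases ha : a = c
    · simp only [ha, BEq.rfl, if_pos] at h
      rcases List.mem_cons.mp h with h | h
      · simp [h]
      · exact ih h
    · rw [if_neg (by simp [ha])] at h
      obtain ⟨hd, tl, e⟩ := List.exists_cons_of_ne_nil (List.splitOnP_ne_nil (· == c) t)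
      rw [e] at h
      simp only [List.modifyHead] at h
      rcases List.mem_cons.mp h with h | h
      · subst h
        intro hm
        rcases List.mem_cons.mp hm with h' | h'
        · exact ha h'.symm
        · exact (ih (e ▸ List.mem_cons_self)) h'
      · exact ih (e ▸ List.mem_cons_of_mem _ h)

theorem pv_splitOn_length_one_iff {c : Char} {l : List Char} :
    (l.splitOn c).length = 1 ↔ c ∉ l := by
  constructor
  · intro h
    obtain ⟨x, e⟩ := List.length_eq_one_iff.mp h
    have hx : c ∉ x := pv_not_mem_of_mem_splitOn (by rw [e]; exact List.mem_cons_self)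
    have h2 := List.intercalate_splitOn l c
    rw [e] at h2
    have h3 : x = l := by rw [← h2]; exact (PySem.Chars.join_singleton [c] x).symm
    exact h3 ▸ hx
  · intro h; rw [pv_splitOn_of_not_mem h]; rfl

theorem pv_isIn_single (c : Char) (s : List Char) :
    PySem.Chars.isIn [c] s = true ↔ c ∈ s := by
  rw [PySem.Chars.isIn_iff_infix, List.singleton_infix_iff]

-- ASCII case-mapping never produces a space from a non-space
theorem pv_toNat_le_of_le {a b : Char} (h : a ≤ b) : a.toNat ≤ b.toNat := by
  have h2 := Char.le_def.mp h
  show a.val.toNat ≤ b.val.toNat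
  exact UInt32.le_iff_toNat_le.mp h2

theorem pv_char_shift_ne_space {n : Nat} (h1 : 97 ≤ n) (h2 : n ≤ 122) : Char.ofNat n ≠ ' ' := by
  intro e
  have h3 := congrArg Char.toNat e
  rw [Char.toNat_ofNat] at h3
  rw [if_pos (Or.inl (by omega))] at h3
  have : (' ').toNat = 32 := by decide
  omega

theorem pv_lowerChar_ne_space {ch : Char} (h : ch ≠ ' ') : PySem.Chars.lowerChar ch ≠ ' ' := by
  unfold PySem.Chars.lowerChar PySem.Chars.isupper
  split_ifs with hu
  · simp only [Bool.and_eq_true, decide_eq_true_eq] at hu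
    have h1 := pv_toNat_le_of_le hu.1
    have h2 := pv_toNat_le_of_le hu.2
    have hA : ('A').toNat = 65 := by decide
    have hZ : ('Z').toNat = 90 := by decide
    exact pv_char_shift_ne_space (by omega) (by omega)
  · exact h

theorem pv_upperChar_ne_space {ch : Char} (h : ch ≠ ' ') : PySem.Chars.upperChar ch ≠ ' ' := by
  unfold PySem.Chars.upperChar PySem.Chars.islower
  split_ifs with hu
  · simp only [Bool.and_eq_true, decide_eq_true_eq] at hu
    have h1 := pv_toNat_le_of_le hu.1
    have h2 := pv_toNat_le_of_le hu.2
    have ha : ('a').toNat = 97 := by decide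
    have hz : ('z').toNat = 122 := by decide
    intro e
    have h3 := congrArg Char.toNat e
    rw [Char.toNat_ofNat] at h3
    rw [if_pos (Or.inl (by omega))] at h3
    have : (' ').toNat = 32 := by decide
    omega
  · exact h

-- the word helper preserves length, non-emptiness, and absence of spaces
theorem pv_fold_length {w : List Char} (h : w ≠ []) : (pvWordFold w).length = w.length := by
  unfold pvWordFold
  split_ifs with hs
  · rfl
  · match w, h with
    | c :: t, _ =>
      simp [PySem.List.pyGet?, PySem.List.pyIdx?, PySem.List.slice_from_one, PySem.Chars.lower]

theorem pv_fold_no_space {w : List Char} (h : ' ' ∉ w) : ' ' ∉ pvWordFold w := by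
  unfold pvWordFold
  split_ifs with hs
  · exact h
  · match w with
    | [] => simp [PySem.List.pyGet?, PySem.List.pyIdx?]
    | c :: t =>
      simp only [PySem.List.pyGet?, PySem.List.pyIdx?, PySem.List.slice_from_one]
      intro hm
      rcases List.mem_cons.mp (by simpa using hm) with h' | h'
      · exact pv_upperChar_ne_space (fun e => h (by simp [e])) h'.symm
      · rw [PySem.Chars.lower] at h'
        obtain ⟨a, ha, he⟩ := List.mem_map.mp h'
        exact pv_lowerChar_ne_space (fun e => h (List.mem_cons_of_mem _ (e ▸ ha))) he

-- joining with a fixed separator: the length depends only on the piece lengths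
theorem pv_join_length_congr (sep : List Char) :
    ∀ (l1 l2 : List (List Char)), l1.map List.length = l2.map List.length →
      (PySem.Chars.join sep l1).length = (PySem.Chars.join sep l2).length := by
  intro l1
  induction l1 with
  | nil =>
    intro l2 h
    match l2 with
    | [] => rfl
    | b :: t2 => simp at h
  | cons a t ih =>
    intro l2 h
    match l2 with
    | [] => simp at h
    | b :: t2 =>
      simp only [List.map_cons, List.cons.injEq] at h
      match t, t2, h.2 with
      | [], [], h2 =>
        simp [PySem.Chars.join_singleton, h.1]
      | [], y :: ys, h2 => simp at h2
      | x :: xs, [], h2 => simp at h2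
      | x :: xs, y :: ys, h2 =>
        rw [PySem.Chars.join_cons_cons, PySem.Chars.join_cons_cons]
        simp only [List.length_append]
        rw [ih (y :: ys) h2, h.1]

-- a Python [:k] slice commutes with map (k of either sign)
theorem pv_slice_map {α β : Type} (f : α → β) (l : List α) (b : Int) :
    PySem.List.slice (l.map f) none (some b) = (PySem.List.slice l none (some b)).map f := by
  cases b with
  | ofNat n =>
    rw [show (Int.ofNat n) = ((n : Nat) : Int) from rfl, PySem.List.slice_to_natCast,
      PySem.List.slice_to_natCast, List.map_take]
  | negSucc n =>
    have e : Int.negSucc n = -((n+1 : Nat) : Int) := by rw [Int.negSucc_eq]; push_cast; ring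
    rw [e, PySem.List.slice_to_neg_natCast _ _ (by omega), PySem.List.slice_to_neg_natCast _ _ (by omega),
      List.map_take, List.length_map]

-- per dash piece: A's lower-then-maybe-abbreviate equals B's single-split branch
theorem pv_piece_eq (max_len : Int) (piece : List Char)
    (h : ∀ w ∈ PySem.Chars.splitOn (PySem.Chars.strip piece) [' '], w ≠ []) :
    pvAbbrevA max_len (pvToLowerA (PySem.Chars.strip piece)) = pvPieceB max_len piece := by
  set t := PySem.Chars.strip piece with ht
  have hsp : PySem.Chars.splitOn t [' '] = t.splitOn ' ' := pv_splitOn_eq ' ' t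
  set ws := t.splitOn ' ' with hws
  have hne : ∀ w ∈ ws, w ≠ [] := fun w hw => h w (by rw [hsp]; exact hw)
  have hnosp : ∀ w ∈ ws, ' ' ∉ w := fun w hw => pv_not_mem_of_mem_splitOn hw
  have hwsne : ws ≠ [] := List.splitOnP_ne_nil _ t
  set ws' := ws.map pvWordFold with hws'
  have hlow : pvToLowerA t = PySem.Chars.join [' '] ws' := by
    unfold pvToLowerA; rw [hsp]
  have hlen : (pvToLowerA t).length = t.length := by
    rw [hlow]
    conv_rhs => rw [show t = [' '].intercalate ws from (List.intercalate_splitOn t ' ').symm]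
    have : ([' '].intercalate ws) = PySem.Chars.join [' '] ws := rfl
    rw [this]
    apply pv_join_length_congr
    rw [hws', List.map_map]
    exact List.map_congr_left (fun w hw => pv_fold_length (hne w hw))
  have hsplit2 : PySem.Chars.splitOn (pvToLowerA t) [' '] = ws' := by
    rw [hlow, pv_splitOn_eq]
    have : PySem.Chars.join [' '] ws' = [' '].intercalate ws' := rfl
    rw [this]
    apply List.splitOn_intercalate
    · intro w' hw'
      obtain ⟨w, hw, e⟩ := List.mem_map.mp hw'
      exact e ▸ pv_fold_no_space (hnosp w hw)
    · intro e; exact hwsne (List.map_eq_nil_iff.mp e)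
  unfold pvAbbrevA pvPieceB
  simp only [← ht]
  rw [hlen, hsplit2, hlow, hsp, ← hws']

-- per comma piece: A's comma-free path equals B's label
theorem pv_base_eq_label (s : List Char) (max_components max_len : Int)
    (h : pvBad s = false) : pvBaseA s max_components max_len = pvLabelB s max_components max_len := by
  unfold pvBaseA pvLabelB
  rw [pv_slice_map]
  apply congrArg
  apply congrArg
  apply List.map_congr_left
  intro d hd
  have hd' : d ∈ PySem.Chars.splitOn s ['-'] := PySem.List.mem_of_mem_slice _ _ _ hd
  apply pv_piece_eq
  intro w hw hwnil
  unfold pvBad at h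
  rw [List.any_eq_false] at h
  have h2 := h d hd'
  rw [Bool.not_eq_true, List.any_eq_false] at h2
  exact (h2 w hw) (by simp [hwnil])

-- ===== VERDICT (by name: the statement is the Claim_ definition above) =====
theorem region2label_spec : Claim_equal_region2label := by
  intro region rg mc ml _hdom hpre
  unfold Spec_region2label
  unfold Pre_region2label at hpre
  simp only [region2label, region2label_alt]
  by_cases hcomma : PySem.Chars.isIn [','] (pvPrep region.toList rg) = true
  · simp only [hcomma, if_pos] at hpre ⊢
    have hmem : ',' ∈ pvPrep region.toList rg := (pv_isIn_single ',' _).mp hcomma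
    have hlen : (PySem.Chars.splitOn (pvPrep region.toList rg) [',']).length ≠ 1 := by
      rw [pv_splitOn_eq]
      exact fun h1 => (pv_splitOn_length_one_iff.mp h1) hmem
    rw [if_neg (by simpa using hlen)]
    apply congrArg
    apply congrArg
    apply List.map_congr_left
    intro e he
    have hb : pvBad (pvPrep e rg) = false := by
      have := (List.all_eq_true.mp hpre) e he
      simpa using this
    exact pv_base_eq_label _ mc ml hb
  · simp only [hcomma, Bool.false_eq_true, if_false] at hpre ⊢
    have hnot : ',' ∉ pvPrep region.toList rg :=
      fun hm => hcomma ((pv_isIn_single ',' _).mpr hm)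
    have hparts : PySem.Chars.splitOn (pvPrep region.toList rg) [','] = [pvPrep region.toList rg] := by
      rw [pv_splitOn_eq]; exact pv_splitOn_of_not_mem hnot
    rw [hparts]
    rw [if_pos (by simp)]
    exact congrArg String.ofList (pv_base_eq_label _ mc ml (by simpa using hpre))
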